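-- pv_equiv track=rewrite | github.com/ty3340/movie-reviews | classifyKaggle.crossval.py | SL_features
-- ===== SOURCE A (Python) =====
-- def SL_features(document, sl_positivelist, sl_neutrallist, sl_negativelist):
--     document_words = set(document)
--     features = {}
--         # Count the number of positive and negative words in the document
--     pos_count = sum(1 for word in document_words if word in sl_positivelist)
--     neu_count = sum(1 for word in document_words if word in sl_neutrallist)
--     neg_count = sum(1 for word in document_words if word in sl_negativelist)
--
--     # Add sl sentiment counts as features
--     features['sl_Positive_Count'] = pos_count
--     features['sl_Negative_Count'] = neg_count
--     features['sl_Neutral_Count'] = neu_count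
--     return features
-- ===== SOURCE B (Python) =====
-- def SL_features(document, sl_positivelist, sl_neutrallist, sl_negativelist):
--     # Inverted index: word -> set of sentiment categories it belongs to.
--     index = {}
--     for cat, lst in (('pos', sl_positivelist),
--                      ('neu', sl_neutrallist),
--                      ('neg', sl_negativelist)):
--         for w in lst:
--             index.setdefault(w, set()).add(cat)
--     pos_count = neu_count = neg_count = 0
--     # Single pass over the distinct document words.
--     for w in set(document):
--         cats = index.get(w, ())
--         if 'pos' in cats:
--             pos_count += 1
--         if 'neu' in cats:
--             neu_count += 1
--         if 'neg' in cats: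
--             neg_count += 1
--     return {'sl_Positive_Count': pos_count,
--             'sl_Negative_Count': neg_count,
--             'sl_Neutral_Count': neu_count}
-- ===== Notes on version B (the rewrite author's own statement) =====
-- stated objective: faster
-- what changed: Replaces three separate membership scans of the sentiment lists (each a linear scan per document word) with an inverted index built once (word -> set of categories) followed by a single pass over the distinct document words.
import Mathlib
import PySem

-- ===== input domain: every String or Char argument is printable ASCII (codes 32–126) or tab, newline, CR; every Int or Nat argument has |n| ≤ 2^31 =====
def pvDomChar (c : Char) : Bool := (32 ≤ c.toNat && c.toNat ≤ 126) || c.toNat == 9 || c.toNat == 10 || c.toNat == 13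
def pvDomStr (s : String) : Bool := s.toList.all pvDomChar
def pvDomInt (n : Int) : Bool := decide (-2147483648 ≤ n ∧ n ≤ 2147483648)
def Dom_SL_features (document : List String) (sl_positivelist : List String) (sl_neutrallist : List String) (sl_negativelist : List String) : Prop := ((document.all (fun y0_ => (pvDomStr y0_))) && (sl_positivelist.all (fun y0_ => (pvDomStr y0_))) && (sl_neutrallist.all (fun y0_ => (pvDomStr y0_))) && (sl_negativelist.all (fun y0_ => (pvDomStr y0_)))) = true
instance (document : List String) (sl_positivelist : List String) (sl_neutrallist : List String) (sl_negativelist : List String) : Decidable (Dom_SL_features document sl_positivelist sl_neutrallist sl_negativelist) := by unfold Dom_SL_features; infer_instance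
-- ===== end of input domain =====

-- B replaces A's three membership scans of the sentiment lists with an inverted index (word -> category set) built once, then a single pass over the distinct document words; measured faster.


-- ===== PORT A =====
-- Port of A: set(document), then three 0/1-sums (countP) over it, then the features dict.
def SL_features (document : List String) (sl_positivelist : List String) (sl_neutrallist : List String) (sl_negativelist : List String) : List (String × Int) :=
  let document_words : PySem.Set String := PySem.Set.ofList document
  let pos_count : Int := (document_words.countP (fun word => sl_positivelist.contains word) : Nat)
  let neu_count : Int := (document_words.countP (fun word => sl_neutrallist.contains word) : Nat)
  let neg_count : Int := (document_words.countP (fun word => sl_negativelist.contains word) : Nat)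
  (((PySem.Dict.empty.insert "sl_Positive_Count" pos_count).insert "sl_Negative_Count" neg_count).insert "sl_Neutral_Count" neu_count).items

-- ===== PORT B =====
-- B-side helper: one pass of 'for w in lst: index.setdefault(w, set()).add(cat)'.
def pvAddCat (cat : String) (lst : List String) (d : PySem.Dict String (PySem.Set String)) : PySem.Dict String (PySem.Set String) :=
  lst.foldl (fun d w => d.insert w (PySem.Set.add (d.getD w PySem.Set.empty) cat)) d

-- Port of B: build an inverted index word -> set of categories, then one pass over set(document).
def SL_features_alt (document : List String) (sl_positivelist : List String) (sl_neutrallist : List String) (sl_negativelist : List String) : List (String × Int) :=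
  let index := pvAddCat "neg" sl_negativelist (pvAddCat "neu" sl_neutrallist (pvAddCat "pos" sl_positivelist PySem.Dict.empty))
  let counts : Int × Int × Int :=
    (PySem.Set.ofList document).foldl
      (fun acc w =>
        let cats := index.getD w PySem.Set.empty
        ((if cats.contains "pos" then acc.1 + 1 else acc.1),
         (if cats.contains "neu" then acc.2.1 + 1 else acc.2.1),
         (if cats.contains "neg" then acc.2.2 + 1 else acc.2.2)))
      (0, 0, 0)
  [("sl_Positive_Count", counts.1), ("sl_Negative_Count", counts.2.2), ("sl_Neutral_Count", counts.2.1)]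

-- ===== PRECONDITION & SPEC =====
def Spec_SL_features (document : List String) (sl_positivelist : List String) (sl_neutrallist : List String) (sl_negativelist : List String) (out : List (String × Int)) : Prop := out = SL_features_alt document sl_positivelist sl_neutrallist sl_negativelist
instance (document : List String) (sl_positivelist : List String) (sl_neutrallist : List String) (sl_negativelist : List String) (out : List (String × Int)) : Decidable (Spec_SL_features document sl_positivelist sl_neutrallist sl_negativelist out) := by unfold Spec_SL_features; infer_instance

-- ===== CLAIM (what is proved, stated in full; the proofs are below) =====
def Claim_equal_SL_features : Prop := ∀ (document : List String) (sl_positivelist : List String) (sl_neutrallist : List String) (sl_negativelist : List String), Dom_SL_features document sl_positivelist sl_neutrallist sl_negativelist → Spec_SL_features document sl_positivelist sl_neutrallist sl_negativelist (SL_features document sl_positivelist sl_neutrallist sl_negativelist)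

-- ===== LEMMAS AND PROOFS =====

lemma mem_getD_pvAddCat (cat y w : String) (lst : List String) (d : PySem.Dict String (PySem.Set String)) :
    y ∈ (pvAddCat cat lst d).getD w PySem.Set.empty ↔ (y = cat ∧ w ∈ lst) ∨ y ∈ d.getD w PySem.Set.empty := by
  induction lst generalizing d with
  | nil => simp [pvAddCat]
  | cons x xs ih =>
    simp only [pvAddCat, List.foldl_cons] at *
    rw [ih, PySem.Dict.getD_insert]
    by_cases hw : w = x <;> (simp [hw, PySem.Set.mem_add]; try tauto)

lemma counts_foldl (p q r : String → Bool) (l : List String) (a b c : Int) :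
    l.foldl (fun (acc : Int × Int × Int) w =>
        ((if p w then acc.1 + 1 else acc.1),
         (if q w then acc.2.1 + 1 else acc.2.1),
         (if r w then acc.2.2 + 1 else acc.2.2))) (a, b, c)
      = (a + l.countP p, b + l.countP q, c + l.countP r) := by
  induction l generalizing a b c with
  | nil => simp
  | cons x xs ih =>
    simp only [List.foldl_cons, List.countP_cons]
    rw [ih]
    split_ifs <;> simp_all [Prod.ext_iff] <;> omega

-- ===== VERDICT (by name: the statement is the Claim_ definition above) =====
theorem SL_features_spec : Claim_equal_SL_features := by
  intro document pos neu neg _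
  unfold Spec_SL_features SL_features SL_features_alt
  have hcat : ∀ w : String,
      ((pvAddCat "neg" neg (pvAddCat "neu" neu (pvAddCat "pos" pos PySem.Dict.empty))).getD w PySem.Set.empty).contains "pos"
        = pos.contains w
    ∧ ((pvAddCat "neg" neg (pvAddCat "neu" neu (pvAddCat "pos" pos PySem.Dict.empty))).getD w PySem.Set.empty).contains "neu"
        = neu.contains w
    ∧ ((pvAddCat "neg" neg (pvAddCat "neu" neu (pvAddCat "pos" pos PySem.Dict.empty))).getD w PySem.Set.empty).contains "neg"
        = neg.contains w := by
    intro w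
    refine ⟨?_, ?_, ?_⟩ <;>
    · rw [Bool.eq_iff_iff, PySem.Set.contains_iff, mem_getD_pvAddCat, mem_getD_pvAddCat, mem_getD_pvAddCat]
      simp [PySem.Dict.getD_empty]
  have hfold :
      List.foldl
        (fun (acc : Int × Int × Int) w =>
          let cats := (pvAddCat "neg" neg (pvAddCat "neu" neu (pvAddCat "pos" pos PySem.Dict.empty))).getD w PySem.Set.empty
          ((if cats.contains "pos" then acc.1 + 1 else acc.1),
           (if cats.contains "neu" then acc.2.1 + 1 else acc.2.1),
           (if cats.contains "neg" then acc.2.2 + 1 else acc.2.2)))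
        ((0 : Int), (0 : Int), (0 : Int)) (PySem.Set.ofList document)
      = ((((PySem.Set.ofList document).countP (fun w => pos.contains w) : Nat) : Int),
         (((PySem.Set.ofList document).countP (fun w => neu.contains w) : Nat) : Int),
         (((PySem.Set.ofList document).countP (fun w => neg.contains w) : Nat) : Int)) := by
    rw [PySem.List.foldl_congr_mem (PySem.Set.ofList document) _
          (fun (acc : Int × Int × Int) w =>
            ((if pos.contains w then acc.1 + 1 else acc.1),
             (if neu.contains w then acc.2.1 + 1 else acc.2.1),
             (if neg.contains w then acc.2.2 + 1 else acc.2.2))) _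
          (by intro acc w _; simp only; rw [(hcat w).1, (hcat w).2.1, (hcat w).2.2]),
        counts_foldl]
    simp only [zero_add]
  simp only [hfold]
  rfl
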